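-- pv_equiv track=rewrite | github.com/sumatrapdfreader/sumatrapdf | scripts/build-analyze.py | sort_errors
-- ===== SOURCE A (Python) =====
-- def sort_errors(lines, rel_path_start):
-- 	if len(lines) == 0: return ([], [], [])
-- 	sumatra_errors = []
-- 	mupdf_errors = []
-- 	ext_errors = []
-- 	for l in lines:
-- 		l = l[rel_path_start:]
-- 		if l.startswith("src\\"):     sumatra_errors.append(l)
-- 		elif l.startswith("mupdf\\"): mupdf_errors.append(l)
-- 		elif l.startswith("ext\\"):   ext_errors.append(l)
-- 		else: assert(False)
-- 	return (sumatra_errors, mupdf_errors, ext_errors)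
-- ===== SOURCE B (Python) =====
-- def sort_errors(lines, rel_path_start):
--     stripped = [l[rel_path_start:] for l in lines]
--     sumatra = [l for l in stripped if l.startswith("src\\")]
--     mupdf = [l for l in stripped if l.startswith("mupdf\\")]
--     ext = [l for l in stripped if l.startswith("ext\\")]
--     assert len(sumatra) + len(mupdf) + len(ext) == len(stripped)
--     return (sumatra, mupdf, ext)
-- ===== Notes on version B (the rewrite author's own statement) =====
-- stated objective: simpler
-- what changed: Replaces A's single loop dispatching each line into one of three mutable accumulators by a map computing the sliced lines once followed by three independent filtering comprehensions (one per prefix), with a single length assert replacing A's per-line assert(False).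
import Mathlib
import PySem

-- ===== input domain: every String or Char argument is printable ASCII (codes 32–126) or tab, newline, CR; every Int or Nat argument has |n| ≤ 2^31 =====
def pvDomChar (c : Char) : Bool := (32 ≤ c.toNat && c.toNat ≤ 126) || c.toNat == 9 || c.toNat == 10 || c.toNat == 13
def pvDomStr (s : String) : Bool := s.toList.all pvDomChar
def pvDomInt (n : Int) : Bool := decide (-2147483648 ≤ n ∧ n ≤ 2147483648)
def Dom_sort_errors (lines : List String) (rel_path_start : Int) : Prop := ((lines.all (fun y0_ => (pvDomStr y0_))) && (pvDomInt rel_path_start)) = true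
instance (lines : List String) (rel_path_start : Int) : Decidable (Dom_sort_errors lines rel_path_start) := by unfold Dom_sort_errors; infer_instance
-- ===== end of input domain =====

-- B is a map + three filtering comprehensions instead of A's single dispatch loop over three accumulators: simpler.
-- Both raise on a line matching no prefix (A per line, B by one final length assert); those inputs are outside Pre_.

-- ===== PORT A =====
-- A's loop: each line is sliced, then appended to exactly one of the three accumulators
-- by the elif chain; the else branch is Python's assert(False) (raises; excluded by Pre_),
-- the port leaves the state unchanged there.
def sort_errors (lines : List String) (rel_path_start : Int) : List String × List String × List String :=
  if lines.length = 0 then ([], [], [])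
  else
    lines.foldl
      (fun (st : List String × List String × List String) l0 =>
        let l := PySem.Str.slice l0 (some rel_path_start) none
        if PySem.Str.startswith l "src\\" then (st.1 ++ [l], st.2.1, st.2.2)
        else if PySem.Str.startswith l "mupdf\\" then (st.1, st.2.1 ++ [l], st.2.2)
        else if PySem.Str.startswith l "ext\\" then (st.1, st.2.1, st.2.2 ++ [l])
        else st)  -- assert(False): unreachable inside Pre_
      ([], [], [])

-- ===== PORT B =====
-- Source B's final 'assert len(sumatra)+len(mupdf)+len(ext) == len(stripped)' raises exactly on
-- inputs outside Pre_; the port returns the three lists there (the assert has no value to port).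
def sort_errors_alt (lines : List String) (rel_path_start : Int) : List String × List String × List String :=
  let stripped := lines.map (fun l => PySem.Str.slice l (some rel_path_start) none)
  (stripped.filter (fun l => PySem.Str.startswith l "src\\"),
   stripped.filter (fun l => PySem.Str.startswith l "mupdf\\"),
   stripped.filter (fun l => PySem.Str.startswith l "ext\\"))

-- ===== PRECONDITION & SPEC =====
-- Pre_: every sliced line starts with one of the three prefixes; on any other nonempty
-- input A's assert(False) raises AssertionError.
def Pre_sort_errors (lines : List String) (rel_path_start : Int) : Prop :=
  lines.all (fun l0 =>
    let l := PySem.Str.slice l0 (some rel_path_start) none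
    PySem.Str.startswith l "src\\" || PySem.Str.startswith l "mupdf\\" || PySem.Str.startswith l "ext\\") = true
instance (lines : List String) (rel_path_start : Int) : Decidable (Pre_sort_errors lines rel_path_start) := by unfold Pre_sort_errors; infer_instance

def pvWitness_sort_errors : List String × Int := (["XXsrc\\a.c", "XXmupdf\\b.c", "XXext\\c.c"], 2)

def Spec_sort_errors (lines : List String) (rel_path_start : Int) (out : List String × List String × List String) : Prop := out = sort_errors_alt lines rel_path_start
instance (lines : List String) (rel_path_start : Int) (out : List String × List String × List String) : Decidable (Spec_sort_errors lines rel_path_start out) := by unfold Spec_sort_errors; infer_instance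

-- ===== CLAIM (what is proved, stated in full; the proofs are below) =====
def Claim_equal_sort_errors : Prop := ∀ (lines : List String) (rel_path_start : Int), Dom_sort_errors lines rel_path_start → Pre_sort_errors lines rel_path_start → Spec_sort_errors lines rel_path_start (sort_errors lines rel_path_start)

-- ===== LEMMAS AND PROOFS =====

-- The three prefixes are mutually exclusive (they differ at the first character).
theorem startswith_src_not_mupdf (s : String) :
    PySem.Str.startswith s "src\\" = true → PySem.Str.startswith s "mupdf\\" = false := by
  intro h
  simp only [← Bool.not_eq_true]
  simp only [PySem.Str.startswith_eq] at h ⊢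
  simp only [PySem.Chars.startswith_iff] at h ⊢
  simp only [show ("src\\" : String).toList = ['s','r','c','\\'] from rfl,
             show ("mupdf\\" : String).toList = ['m','u','p','d','f','\\'] from rfl] at h ⊢
  rcases h with ⟨t, ht⟩
  rintro ⟨u, hu⟩
  rw [← ht] at hu
  simp at hu

theorem startswith_src_not_ext (s : String) :
    PySem.Str.startswith s "src\\" = true → PySem.Str.startswith s "ext\\" = false := by
  intro h
  simp only [← Bool.not_eq_true]
  simp only [PySem.Str.startswith_eq] at h ⊢
  simp only [PySem.Chars.startswith_iff] at h ⊢
  simp only [show ("src\\" : String).toList = ['s','r','c','\\'] from rfl,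
             show ("ext\\" : String).toList = ['e','x','t','\\'] from rfl] at h ⊢
  rcases h with ⟨t, ht⟩
  rintro ⟨u, hu⟩
  rw [← ht] at hu
  simp at hu

theorem startswith_mupdf_not_ext (s : String) :
    PySem.Str.startswith s "mupdf\\" = true → PySem.Str.startswith s "ext\\" = false := by
  intro h
  simp only [← Bool.not_eq_true]
  simp only [PySem.Str.startswith_eq] at h ⊢
  simp only [PySem.Chars.startswith_iff] at h ⊢
  simp only [show ("mupdf\\" : String).toList = ['m','u','p','d','f','\\'] from rfl,
             show ("ext\\" : String).toList = ['e','x','t','\\'] from rfl] at h ⊢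
  rcases h with ⟨t, ht⟩
  rintro ⟨u, hu⟩
  rw [← ht] at hu
  simp at hu

-- A's fold from an arbitrary state appends, bucket by bucket, exactly B's three filters.
theorem fold_eq_filters (r : Int) (lines : List String) :
    ∀ (s m e : List String),
      lines.foldl
        (fun (st : List String × List String × List String) l0 =>
          let l := PySem.Str.slice l0 (some r) none
          if PySem.Str.startswith l "src\\" then (st.1 ++ [l], st.2.1, st.2.2)
          else if PySem.Str.startswith l "mupdf\\" then (st.1, st.2.1 ++ [l], st.2.2)
          else if PySem.Str.startswith l "ext\\" then (st.1, st.2.1, st.2.2 ++ [l])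
          else st)
        (s, m, e)
      = (s ++ (lines.map (fun l => PySem.Str.slice l (some r) none)).filter (fun l => PySem.Str.startswith l "src\\"),
         m ++ (lines.map (fun l => PySem.Str.slice l (some r) none)).filter (fun l => PySem.Str.startswith l "mupdf\\"),
         e ++ (lines.map (fun l => PySem.Str.slice l (some r) none)).filter (fun l => PySem.Str.startswith l "ext\\")) := by
  induction lines with
  | nil => intro s m e; simp
  | cons hd tl ih =>
    intro s m e
    simp only [List.foldl_cons, List.map_cons, List.filter_cons]
    by_cases h1 : PySem.Str.startswith (PySem.Str.slice hd (some r) none) "src\\" = true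
    · have m1 := startswith_src_not_mupdf _ h1
      have e1 := startswith_src_not_ext _ h1
      rw [ih]
      simp at h1 m1 e1
      simp [h1, m1, e1]
    · by_cases h2 : PySem.Str.startswith (PySem.Str.slice hd (some r) none) "mupdf\\" = true
      · have e2 := startswith_mupdf_not_ext _ h2
        rw [if_neg h1, ih]
        simp only [Bool.not_eq_true] at h1
        simp at h1 h2 e2
        simp [h1, h2, e2]
      · by_cases h3 : PySem.Str.startswith (PySem.Str.slice hd (some r) none) "ext\\" = true
        · rw [if_neg h1, if_neg h2, ih]
          simp only [Bool.not_eq_true] at h1 h2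
          simp at h1 h2 h3
          simp [h1, h2, h3]
        · rw [if_neg h1, if_neg h2, if_neg h3, ih]
          simp only [Bool.not_eq_true] at h1 h2 h3
          simp at h1 h2 h3
          simp [h1, h2, h3]

-- ===== VERDICT (by name: the statement is the Claim_ definition above) =====
theorem sort_errors_spec : Claim_equal_sort_errors := by
  intro lines r _ _
  unfold Spec_sort_errors sort_errors sort_errors_alt
  cases lines with
  | nil => simp
  | cons hd tl =>
    rw [if_neg (by simp)]
    simpa using fold_eq_filters r (hd :: tl) [] [] []
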